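-- pv_equiv track=rewrite | github.com/lejams/options_dashboard | fetch_option_data.py | expected_output_files
-- ===== SOURCE A (Python) =====
-- def expected_output_files(days_list, underlyers, include_spot=True, include_fwd=True):
--     expected = []
--
--     for underlyer in underlyers:
--         for date in days_list:
--             if include_spot:
--                 for cp in ["Call", "Put"]:
--                     expected.append(
--                         {
--                             "ticker": underlyer,
--                             "surface": "spot",
--                             "option_type": cp,
--                             "metric": "percent",
--                             "date": date,
--                             "filename": f"{underlyer}_spot_{cp}_option_percent_{date}.csv",
--                         }
--                     )
--                     expected.append(
--                         {
--                             "ticker": underlyer,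
--                             "surface": "spot",
--                             "option_type": cp,
--                             "metric": "vol",
--                             "date": date,
--                             "filename": f"{underlyer}_spot_{cp}_option_vol_{date}.csv",
--                         }
--                     )
--
--             if include_fwd:
--                 for cp in ["Call", "Put"]:
--                     expected.append(
--                         {
--                             "ticker": underlyer,
--                             "surface": "fwd",
--                             "option_type": cp,
--                             "metric": "percent",
--                             "date": date,
--                             "filename": f"{underlyer}_fwd_{cp}_option_percent_{date}.csv",
--                         }
--                     )
--                     expected.append(
--                         {
--                             "ticker": underlyer,
--                             "surface": "fwd",
--                             "option_type": cp,
--                             "metric": "vol",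
--                             "date": date,
--                             "filename": f"{underlyer}_fwd_{cp}_option_vol_{date}.csv",
--                         }
--                     )
--
--     return expected
-- ===== SOURCE B (Python) =====
-- def expected_output_files(days_list, underlyers, include_spot=True, include_fwd=True):
--     # Flat-index enumeration: decode each row index k by divmod instead of nested loops.
--     surfaces = (["spot"] if include_spot else []) + (["fwd"] if include_fwd else [])
--     nd, ns = len(days_list), len(surfaces)
--     cps = ["Call", "Put"]
--     mets = ["percent", "vol"]
--     out = []
--     for k in range(len(underlyers) * nd * ns * 4):
--         k, m = divmod(k, 2)
--         k, c = divmod(k, 2)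
--         k, s = divmod(k, ns)
--         u, d = divmod(k, nd)
--         ticker, date, surf = underlyers[u], days_list[d], surfaces[s]
--         cp, met = cps[c], mets[m]
--         out.append({
--             "ticker": ticker,
--             "surface": surf,
--             "option_type": cp,
--             "metric": met,
--             "date": date,
--             "filename": f"{ticker}_{surf}_{cp}_option_{met}_{date}.csv",
--         })
--     return out
-- ===== Notes on version B (the rewrite author's own statement) =====
-- stated objective: alternative
-- what changed: Replaces A's four unrolled nested-loop append blocks by a flat enumeration over a single index range whose rows are obtained by divmod-decoding the index into (underlyer, date, surface, call/put, metric) positions.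
import Mathlib
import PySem

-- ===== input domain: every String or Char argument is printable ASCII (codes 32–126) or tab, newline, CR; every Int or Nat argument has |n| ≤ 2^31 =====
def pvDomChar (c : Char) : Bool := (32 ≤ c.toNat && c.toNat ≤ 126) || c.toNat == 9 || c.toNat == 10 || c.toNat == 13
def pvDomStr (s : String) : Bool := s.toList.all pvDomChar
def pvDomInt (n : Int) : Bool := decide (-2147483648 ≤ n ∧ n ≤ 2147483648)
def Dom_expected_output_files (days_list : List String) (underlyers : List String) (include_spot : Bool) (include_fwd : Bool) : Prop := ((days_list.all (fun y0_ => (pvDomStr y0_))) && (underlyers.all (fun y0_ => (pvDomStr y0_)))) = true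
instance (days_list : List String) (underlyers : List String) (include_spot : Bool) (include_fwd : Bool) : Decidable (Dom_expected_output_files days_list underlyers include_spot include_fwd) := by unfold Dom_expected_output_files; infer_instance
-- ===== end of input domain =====

-- B replaces A's nested loops with a flat index range decoded by divmod into the five row coordinates (objective: alternative).

-- ===== PORT A =====
def expected_output_files (days_list : List String) (underlyers : List String) (include_spot : Bool) (include_fwd : Bool) : List (List (String × String)) :=
  underlyers.foldl (fun expected underlyer =>
    days_list.foldl (fun expected date =>
      let expected :=
        if include_spot then
          (["Call", "Put"]).foldl (fun expected cp =>
            (expected ++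
              [[("ticker", underlyer), ("surface", "spot"), ("option_type", cp),
                ("metric", "percent"), ("date", date),
                ("filename", underlyer ++ "_spot_" ++ cp ++ "_option_percent_" ++ date ++ ".csv")]]) ++
              [[("ticker", underlyer), ("surface", "spot"), ("option_type", cp),
                ("metric", "vol"), ("date", date),
                ("filename", underlyer ++ "_spot_" ++ cp ++ "_option_vol_" ++ date ++ ".csv")]]) expected
        else expected
      let expected :=
        if include_fwd then
          (["Call", "Put"]).foldl (fun expected cp =>
            (expected ++
              [[("ticker", underlyer), ("surface", "fwd"), ("option_type", cp),
                ("metric", "percent"), ("date", date),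
                ("filename", underlyer ++ "_fwd_" ++ cp ++ "_option_percent_" ++ date ++ ".csv")]]) ++
              [[("ticker", underlyer), ("surface", "fwd"), ("option_type", cp),
                ("metric", "vol"), ("date", date),
                ("filename", underlyer ++ "_fwd_" ++ cp ++ "_option_vol_" ++ date ++ ".csv")]]) expected
        else expected
      expected) expected) []

-- ===== PORT B =====
-- one output row (the dict Source B appends)
def pvRow (u d s cp m : String) : List (String × String) :=
  [("ticker", u), ("surface", s), ("option_type", cp), ("metric", m), ("date", d),
   ("filename", u ++ "_" ++ s ++ "_" ++ cp ++ "_option_" ++ m ++ "_" ++ d ++ ".csv")]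

def expected_output_files_alt (days_list : List String) (underlyers : List String) (include_spot : Bool) (include_fwd : Bool) : List (List (String × String)) :=
  let surfaces := (if include_spot then ["spot"] else []) ++ (if include_fwd then ["fwd"] else [])
  let nd := days_list.length
  let ns := surfaces.length
  let cps := ["Call", "Put"]
  let mets := ["percent", "vol"]
  (List.range (underlyers.length * nd * ns * 4)).map (fun k =>
    let m := k % 2; let k := k / 2
    let c := k % 2; let k := k / 2
    let s := k % ns; let k := k / ns
    let d := k % nd; let u := k / nd
    pvRow (underlyers.getD u "") (days_list.getD d "") (surfaces.getD s "")
      (cps.getD c "") (mets.getD m ""))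

-- ===== PRECONDITION & SPEC =====
def Spec_expected_output_files (days_list : List String) (underlyers : List String) (include_spot : Bool) (include_fwd : Bool) (out : List (List (String × String))) : Prop := out = expected_output_files_alt days_list underlyers include_spot include_fwd
instance (days_list : List String) (underlyers : List String) (include_spot : Bool) (include_fwd : Bool) (out : List (List (String × String))) : Decidable (Spec_expected_output_files days_list underlyers include_spot include_fwd out) := by unfold Spec_expected_output_files; infer_instance

-- ===== CLAIM (what is proved, stated in full; the proofs are below) =====
def Claim_equal_expected_output_files : Prop := ∀ (days_list : List String) (underlyers : List String) (include_spot : Bool) (include_fwd : Bool), Dom_expected_output_files days_list underlyers include_spot include_fwd → Spec_expected_output_files days_list underlyers include_spot include_fwd (expected_output_files days_list underlyers include_spot include_fwd)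

-- ===== LEMMAS AND PROOFS =====

-- the block emitted for one (underlyer, date) pair
def pvBlock (surfaces : List String) (u d : String) : List (List (String × String)) :=
  surfaces.flatMap (fun s => (["Call", "Put"]).flatMap (fun cp =>
    (["percent", "vol"]).map (fun m => pvRow u d s cp m)))

-- A's per-(underlyer, date) step appends exactly the block
theorem step_eq (include_spot include_fwd : Bool) (u d : String)
    (acc : List (List (String × String))) :
    (let e1 :=
      if include_spot then
        (["Call", "Put"]).foldl (fun expected cp =>
          (expected ++
            [[("ticker", u), ("surface", "spot"), ("option_type", cp),
              ("metric", "percent"), ("date", d),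
              ("filename", u ++ "_spot_" ++ cp ++ "_option_percent_" ++ d ++ ".csv")]]) ++
            [[("ticker", u), ("surface", "spot"), ("option_type", cp),
              ("metric", "vol"), ("date", d),
              ("filename", u ++ "_spot_" ++ cp ++ "_option_vol_" ++ d ++ ".csv")]]) acc
      else acc
     if include_fwd then
        (["Call", "Put"]).foldl (fun expected cp =>
          (expected ++
            [[("ticker", u), ("surface", "fwd"), ("option_type", cp),
              ("metric", "percent"), ("date", d),
              ("filename", u ++ "_fwd_" ++ cp ++ "_option_percent_" ++ d ++ ".csv")]]) ++
            [[("ticker", u), ("surface", "fwd"), ("option_type", cp),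
              ("metric", "vol"), ("date", d),
              ("filename", u ++ "_fwd_" ++ cp ++ "_option_vol_" ++ d ++ ".csv")]]) e1
      else e1) =
    acc ++ pvBlock ((if include_spot then ["spot"] else []) ++ (if include_fwd then ["fwd"] else [])) u d := by
  cases include_spot <;> cases include_fwd <;>
    simp [pvBlock, pvRow, List.foldl, String.append_assoc] <;>
    and_intros <;> (simp only [← String.append_assoc]; rfl)

theorem foldl_step_flatMap {α : Type} (xs : List α)
    (g : α → List (List (String × String))) (acc : List (List (String × String)))
    (f : List (List (String × String)) → α → List (List (String × String)))
    (hf : ∀ a x, f a x = a ++ g x) :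
    xs.foldl f acc = acc ++ xs.flatMap g := by
  induction xs generalizing acc with
  | nil => simp
  | cons x xs ih => simp [List.foldl, hf, ih]

-- A as a flatMap over underlyers and dates
theorem portA_eq (days_list underlyers : List String) (include_spot include_fwd : Bool) :
    expected_output_files days_list underlyers include_spot include_fwd =
    underlyers.flatMap (fun u => days_list.flatMap (fun d =>
      pvBlock ((if include_spot then ["spot"] else []) ++ (if include_fwd then ["fwd"] else [])) u d)) := by
  unfold expected_output_files
  rw [foldl_step_flatMap underlyers
      (fun u => days_list.flatMap (fun d =>
        pvBlock ((if include_spot then ["spot"] else []) ++ (if include_fwd then ["fwd"] else [])) u d)) []]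
  · simp
  · intro a u
    rw [foldl_step_flatMap days_list
        (fun d => pvBlock ((if include_spot then ["spot"] else []) ++ (if include_fwd then ["fwd"] else [])) u d) a]
    intro a' d
    exact step_eq include_spot include_fwd u d a'

-- splitting a flat index range: map version
theorem range_mul_map {α : Type} (a b : Nat) (f : Nat → Nat → α) :
    (List.range (a * b)).map (fun k => f (k / b) (k % b)) =
    (List.range a).flatMap (fun i => (List.range b).map (f i)) := by
  rcases Nat.eq_zero_or_pos b with hb | hb
  · subst hb; simp
  · induction a with
    | zero => simp
    | succ n ih =>
      rw [Nat.succ_mul, List.range_add, List.map_append, ih, List.range_succ,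
          List.flatMap_append]
      congr 1
      simp only [List.map_map, List.flatMap_cons, List.flatMap_nil, List.append_nil]
      apply List.map_congr_left
      intro j hj
      have hjb : j < b := List.mem_range.mp hj
      have h1 : (n * b + j) / b = n := by
        rw [Nat.mul_comm n b, Nat.mul_add_div hb, Nat.div_eq_of_lt hjb, Nat.add_zero]
      have h2 : (n * b + j) % b = j := by
        rw [Nat.mul_comm n b, Nat.mul_add_mod, Nat.mod_eq_of_lt hjb]
      simp only [Function.comp_def, h1, h2]

-- splitting a flat index range: flatMap version
theorem range_mul_flatMap {α : Type} (a b : Nat) (f : Nat → Nat → List α) :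
    (List.range (a * b)).flatMap (fun k => f (k / b) (k % b)) =
    (List.range a).flatMap (fun i => (List.range b).flatMap (f i)) := by
  rcases Nat.eq_zero_or_pos b with hb | hb
  · subst hb; simp
  · induction a with
    | zero => simp
    | succ n ih =>
      rw [Nat.succ_mul, List.range_add, List.flatMap_append, ih, List.range_succ,
          List.flatMap_append]
      congr 1
      simp only [List.flatMap_cons, List.flatMap_nil, List.append_nil]
      rw [List.flatMap_map]
      apply List.flatMap_congr
      intro j hj
      have hjb : j < b := List.mem_range.mp hj
      have h1 : (n * b + j) / b = n := by
        rw [Nat.mul_comm n b, Nat.mul_add_div hb, Nat.div_eq_of_lt hjb, Nat.add_zero]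
      have h2 : (n * b + j) % b = j := by
        rw [Nat.mul_comm n b, Nat.mul_add_mod, Nat.mod_eq_of_lt hjb]
      rw [h1, h2]

-- a range-indexed getD flatMap is the flatMap over the list itself
theorem flatMap_getD_range {α : Type} (xs : List String) (f : String → List α) :
    (List.range xs.length).flatMap (fun i => f (xs.getD i "")) = xs.flatMap f := by
  induction xs with
  | nil => simp
  | cons x t ih =>
    rw [List.length_cons, List.range_succ_eq_map, List.flatMap_cons, List.flatMap_map]
    simp only [List.getD_cons_zero, List.getD_cons_succ]
    rw [ih, List.flatMap_cons]

-- B as the same flatMap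
theorem portB_eq (days_list underlyers : List String) (include_spot include_fwd : Bool) :
    expected_output_files_alt days_list underlyers include_spot include_fwd =
    underlyers.flatMap (fun u => days_list.flatMap (fun d =>
      pvBlock ((if include_spot then ["spot"] else []) ++ (if include_fwd then ["fwd"] else [])) u d)) := by
  unfold expected_output_files_alt
  set surfaces := (if include_spot then ["spot"] else []) ++ (if include_fwd then ["fwd"] else []) with hsurf
  set nd := days_list.length
  set ns := surfaces.length
  set nu := underlyers.length
  show (List.range (nu * nd * ns * 4)).map _ = _
  have h4 : nu * nd * ns * 4 = ((nu * nd * ns * 2) * 2) := by ring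
  rw [h4]
  rw [range_mul_map (nu * nd * ns * 2) 2
    (fun q m => pvRow (underlyers.getD (q / 2 / ns / nd) "") (days_list.getD (q / 2 / ns % nd) "")
      (surfaces.getD (q / 2 % ns) "") ((["Call", "Put"]).getD (q % 2) "") ((["percent", "vol"]).getD m ""))]
  have h2 : nu * nd * ns * 2 = ((nu * nd * ns) * 2) := by ring
  rw [h2]
  rw [range_mul_flatMap (nu * nd * ns) 2
    (fun q c => (List.range 2).map (fun m =>
      pvRow (underlyers.getD (q / ns / nd) "") (days_list.getD (q / ns % nd) "")
        (surfaces.getD (q % ns) "") ((["Call", "Put"]).getD c "") ((["percent", "vol"]).getD m "")))]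
  have h3 : nu * nd * ns = ((nu * nd) * ns) := by ring
  rw [h3]
  rw [range_mul_flatMap (nu * nd) ns
    (fun q s => (List.range 2).flatMap (fun c => (List.range 2).map (fun m =>
      pvRow (underlyers.getD (q / nd) "") (days_list.getD (q % nd) "")
        (surfaces.getD s "") ((["Call", "Put"]).getD c "") ((["percent", "vol"]).getD m ""))))]
  rw [range_mul_flatMap nu nd
    (fun u d => (List.range ns).flatMap (fun s => (List.range 2).flatMap (fun c => (List.range 2).map (fun m =>
      pvRow (underlyers.getD u "") (days_list.getD d "")
        (surfaces.getD s "") ((["Call", "Put"]).getD c "") ((["percent", "vol"]).getD m "")))))]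
  refine Eq.trans (flatMap_getD_range underlyers (fun u =>
    (List.range nd).flatMap (fun d => (List.range ns).flatMap (fun s =>
      (List.range 2).flatMap (fun c => (List.range 2).map (fun m =>
        pvRow u (days_list.getD d "") (surfaces.getD s "")
          ((["Call", "Put"]).getD c "") ((["percent", "vol"]).getD m ""))))))) ?_
  apply List.flatMap_congr
  intro u _
  refine Eq.trans (flatMap_getD_range days_list (fun d =>
    (List.range ns).flatMap (fun s => (List.range 2).flatMap (fun c =>
      (List.range 2).map (fun m =>
        pvRow u d (surfaces.getD s "")
          ((["Call", "Put"]).getD c "") ((["percent", "vol"]).getD m "")))))) ?_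
  apply List.flatMap_congr
  intro d _
  refine Eq.trans (flatMap_getD_range surfaces (fun s =>
    (List.range 2).flatMap (fun c => (List.range 2).map (fun m =>
      pvRow u d s ((["Call", "Put"]).getD c "") ((["percent", "vol"]).getD m ""))))) ?_
  unfold pvBlock
  apply List.flatMap_congr
  intro s _
  simp [List.range_succ, pvRow]

-- ===== VERDICT (by name: the statement is the Claim_ definition above) =====
theorem expected_output_files_spec : Claim_equal_expected_output_files := by
  intro days_list underlyers include_spot include_fwd _
  show _ = _
  rw [portA_eq, portB_eq]
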